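-- pv_equiv track=rewrite | github.com/Luigicv03/Castell-Pizzas | castell.py | collapse_pizza_category_to_bases
-- ===== SOURCE A (Python) =====
-- PIZZA_QUICK_ADD_CATEGORIES = ("Pizzas Tradicionales", "Pizzas Especiales")
--
-- def pizza_base_name_from_key(menu_key):
--     """Margherita (Personal 25cm) -> Margherita"""
--     if " (" not in menu_key:
--         return menu_key
--     return menu_key.split(" (")[0]
--
-- def collapse_pizza_category_to_bases(category, items_dict):
--     """Una fila por pizza (sin tamaños): nombre base -> precio mínimo (solo referencia interna)."""
--     if category not in PIZZA_QUICK_ADD_CATEGORIES: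
--         return items_dict
--     bases = {}
--     for k, price in items_dict.items():
--         b = pizza_base_name_from_key(k)
--         if b not in bases or price < bases[b]:
--             bases[b] = price
--     return bases
-- ===== SOURCE B (Python) =====
-- PIZZA_QUICK_ADD_CATEGORIES = ("Pizzas Tradicionales", "Pizzas Especiales")
--
-- def pizza_base_name_from_key(menu_key):
--     """Margherita (Personal 25cm) -> Margherita"""
--     if " (" not in menu_key:
--         return menu_key
--     return menu_key.split(" (")[0]
--
-- def collapse_pizza_category_to_bases(category, items_dict):
--     """Una fila por pizza (sin tamaños): nombre base -> precio mínimo (solo referencia interna)."""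
--     if category not in PIZZA_QUICK_ADD_CATEGORIES:
--         return items_dict
--     groups = {}
--     for k, price in items_dict.items():
--         groups.setdefault(pizza_base_name_from_key(k), []).append(price)
--     return {b: min(prices) for b, prices in groups.items()}
-- ===== Notes on version B (the rewrite author's own statement) =====
-- stated objective: alternative
-- what changed: B replaces A's fused min-tracking pass (compare-and-overwrite per item) with a build-a-table-then-reduce decomposition: one pass grouping prices per base name via setdefault/append, then a comprehension taking min of each group.
import Mathlib
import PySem

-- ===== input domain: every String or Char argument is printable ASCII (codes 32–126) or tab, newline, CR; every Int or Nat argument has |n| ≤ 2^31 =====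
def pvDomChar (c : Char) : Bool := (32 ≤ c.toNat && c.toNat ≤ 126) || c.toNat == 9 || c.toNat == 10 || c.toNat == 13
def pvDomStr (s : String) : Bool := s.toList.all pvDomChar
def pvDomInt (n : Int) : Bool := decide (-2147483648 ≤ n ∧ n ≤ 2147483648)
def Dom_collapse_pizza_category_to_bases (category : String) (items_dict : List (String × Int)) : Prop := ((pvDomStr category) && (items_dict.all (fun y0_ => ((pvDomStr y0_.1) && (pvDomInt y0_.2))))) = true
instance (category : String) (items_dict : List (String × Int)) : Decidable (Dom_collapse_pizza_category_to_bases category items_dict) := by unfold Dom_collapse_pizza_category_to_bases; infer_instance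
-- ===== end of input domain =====

-- B replaces A's fused min-tracking pass with group-prices-per-base then take min of each group; alternative decomposition, same cost.

-- ===== PORT A =====
def pizza_base_name_from_key (menu_key : String) : String :=
  if ¬ (PySem.Str.isIn " (" menu_key = true) then menu_key
  else ((PySem.Str.split? menu_key " (").getD []).headD ""  -- split(" (")[0]; split? is none only for sep = "", and the result is never empty: getD/headD are totality guards

def collapse_pizza_category_to_bases (category : String) (items_dict : List (String × Int)) : List (String × Int) :=
  if ¬ (category = "Pizzas Tradicionales" ∨ category = "Pizzas Especiales") then items_dict
  else (items_dict.foldl (fun bases kp =>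
          let b := pizza_base_name_from_key kp.1
          if !(bases.contains b) || kp.2 < bases.getD b 0 then bases.insert b kp.2 else bases)
        (PySem.Dict.empty : PySem.Dict String Int)).items

-- ===== PORT B =====
def pyMin (xs : List Int) : Int :=
  -- builtin min(list); the [] branch is a totality guard (every group is nonempty)
  match xs with | [] => 0 | x :: rest => rest.foldl min x

def collapse_pizza_category_to_bases_alt (category : String) (items_dict : List (String × Int)) : List (String × Int) :=
  if ¬ (category = "Pizzas Tradicionales" ∨ category = "Pizzas Especiales") then items_dict
  else
    let groups : PySem.Dict String (List Int) :=
      items_dict.foldl (fun g kp => g.modify (pizza_base_name_from_key kp.1) [] (fun ps => ps ++ [kp.2]))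
        PySem.Dict.empty
    groups.items.map (fun bp => (bp.1, pyMin bp.2))

-- ===== PRECONDITION & SPEC =====
def Spec_collapse_pizza_category_to_bases (category : String) (items_dict : List (String × Int)) (out : List (String × Int)) : Prop := out = collapse_pizza_category_to_bases_alt category items_dict
instance (category : String) (items_dict : List (String × Int)) (out : List (String × Int)) : Decidable (Spec_collapse_pizza_category_to_bases category items_dict out) := by unfold Spec_collapse_pizza_category_to_bases; infer_instance

-- ===== CLAIM (what is proved, stated in full; the proofs are below) =====
def Claim_equal_collapse_pizza_category_to_bases : Prop := ∀ (category : String) (items_dict : List (String × Int)), Dom_collapse_pizza_category_to_bases category items_dict → Spec_collapse_pizza_category_to_bases category items_dict (collapse_pizza_category_to_bases category items_dict)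

-- ===== LEMMAS AND PROOFS =====

-- A's loop step
def pvStepA (bases : PySem.Dict String Int) (kp : String × Int) : PySem.Dict String Int :=
  let b := pizza_base_name_from_key kp.1
  if !(bases.contains b) || kp.2 < bases.getD b 0 then bases.insert b kp.2 else bases

-- B's grouping step
def pvStepB (g : PySem.Dict String (List Int)) (kp : String × Int) : PySem.Dict String (List Int) :=
  g.modify (pizza_base_name_from_key kp.1) [] (fun ps => ps ++ [kp.2])

-- B's reduction of the group table
def pvRed (g : PySem.Dict String (List Int)) : PySem.Dict String Int :=
  PySem.Dict.mk (g.items.map (fun q => (q.1, pyMin q.2)))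

def pvInv (g : PySem.Dict String (List Int)) : Prop :=
  g.keys.Nodup ∧ ∀ q ∈ g.items, q.2 ≠ []

theorem pyMin_append (ps : List Int) (p : Int) (h : ps ≠ []) :
    pyMin (ps ++ [p]) = if p < pyMin ps then p else pyMin ps := by
  cases ps with
  | nil => exact absurd rfl h
  | cons x xs =>
    simp only [pyMin, List.cons_append, List.foldl_append, List.foldl]
    rw [min_def]
    split_ifs <;> omega

theorem pvFind_unique {α : Type} (b : String) (ps : α) :
    ∀ (l : List (String × α)), (l.map Prod.fst).Nodup →
      l.find? (fun q => q.1 == b) = some (b, ps) →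
      ∀ q ∈ l, q.1 = b → q = (b, ps) := by
  intro l
  induction l with
  | nil => intro _ hf; simp at hf
  | cons hd t ih =>
    intro hnd hf q hq hqb
    simp only [List.map_cons, List.nodup_cons] at hnd
    by_cases hhd : hd.1 = b
    · have hhd' : hd = (b, ps) := by
        rw [List.find?_cons] at hf
        simp only [hhd, beq_self_eq_true] at hf
        exact (Option.some.injEq _ _).mp hf
      rcases List.mem_cons.mp hq with h | h
      · exact h.trans hhd'
      · exfalso
        have hq2 : (b, q.2) ∈ t := by
          rwa [show q = (b, q.2) from Prod.ext hqb rfl] at h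
        have hbmem : b ∈ List.map Prod.fst t := List.mem_map_of_mem hq2
        exact hnd.1 (hhd ▸ hbmem)
    · rw [List.find?_cons] at hf
      simp only [show (hd.1 == b) = false from beq_eq_false_iff_ne.mpr hhd] at hf
      rcases List.mem_cons.mp hq with h | h
      · exact absurd (h ▸ hqb) hhd
      · exact ih hnd.2 hf q h hqb

theorem pvRed_contains (g : PySem.Dict String (List Int)) (b : String) :
    (pvRed g).contains b = g.contains b := by
  simp [pvRed, PySem.Dict.contains, List.any_map, Function.comp_def]

theorem pvRed_get? (g : PySem.Dict String (List Int)) (b : String) :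
    (pvRed g).get? b = (g.get? b).map pyMin := by
  simp [pvRed, PySem.Dict.get?, List.find?_map, Function.comp_def, Option.map_map]

theorem pv_step_comm (g : PySem.Dict String (List Int)) (h : pvInv g) (kp : String × Int) :
    pvStepA (pvRed g) kp = pvRed (pvStepB g kp) := by
  obtain ⟨hnd, hne⟩ := h
  set b := pizza_base_name_from_key kp.1 with hb
  by_cases hc : g.contains b = true
  · -- key present: get its group ps
    have hsome : (g.get? b).isSome := by
      rw [PySem.Dict.contains_eq_isSome_get?] at hc; exact hc
    obtain ⟨ps, hps⟩ := Option.isSome_iff_exists.mp hsome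
    have hfind : g.items.find? (fun q => q.1 == b) = some (b, ps) := by
      simp only [PySem.Dict.get?, Option.map_eq_some_iff] at hps
      obtain ⟨⟨k0, v0⟩, hf, hv⟩ := hps
      have hk0 : k0 = b := by
        have := List.find?_some hf; simpa using this
      subst hk0; cases hv; exact hf
    have hmem : (b, ps) ∈ g.items := List.mem_of_find?_eq_some hfind
    have hpsne : ps ≠ [] := hne _ hmem
    have hgetD : (pvRed g).getD b 0 = pyMin ps := by
      simp [PySem.Dict.getD, pvRed_get?, hps]
    have hmod : pvStepB g kp = g.insert b (ps ++ [kp.2]) := by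
      simp [pvStepB, PySem.Dict.modify, ← hb, PySem.Dict.getD, hps]
    have hcred : (pvRed g).contains b = true := by rw [pvRed_contains]; exact hc
    have hred_items : (pvRed (pvStepB g kp)).items =
        g.items.map (fun q => if q.1 == b then (b, pyMin (ps ++ [kp.2])) else (q.1, pyMin q.2)) := by
      rw [hmod]
      show (g.insert b (ps ++ [kp.2])).items.map (fun q => (q.1, pyMin q.2)) = _
      rw [PySem.Dict.items_insert_of_contains _ _ hc, List.map_map]
      apply List.map_congr_left
      intro q _
      by_cases hq : q.1 = b <;> simp [hq]
    by_cases hlt : kp.2 < pyMin ps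
    · -- new minimum: A overwrites, B's group min becomes kp.2
      have hstepA : pvStepA (pvRed g) kp = (pvRed g).insert b kp.2 := by
        simp [pvStepA, ← hb, hgetD, hlt]
      apply PySem.Dict.ext
      rw [hstepA, hred_items, PySem.Dict.items_insert_of_contains _ _ hcred]
      show ((pvRed g).items).map _ = _
      simp only [pvRed, List.map_map]
      apply List.map_congr_left
      intro q _
      by_cases hq : q.1 = b <;>
        simp [hq, pyMin_append ps kp.2 hpsne, hlt]
    · -- not a new minimum: A leaves the dict, B's group min is unchanged
      have hstepA : pvStepA (pvRed g) kp = pvRed g := by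
        simp [pvStepA, ← hb, hgetD, hlt, hcred]
      apply PySem.Dict.ext
      rw [hstepA, hred_items]
      show (g.items.map (fun q => (q.1, pyMin q.2))) = _
      symm
      apply List.map_congr_left
      intro q hq
      by_cases hqb : q.1 = b
      · have := pvFind_unique b ps g.items hnd hfind q hq hqb
        rw [this]
        simp [pyMin_append ps kp.2 hpsne, hlt]
      · simp [hqb]
  · -- new key: both append
    have hc' : g.contains b = false := by simpa using hc
    have hgetD : g.getD b [] = [] := PySem.Dict.getD_of_not_contains _ _ hc'
    have hmod : pvStepB g kp = g.insert b [kp.2] := by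
      simp [pvStepB, PySem.Dict.modify, ← hb, hgetD]
    have hcred : (pvRed g).contains b = false := by rw [pvRed_contains]; exact hc'
    have hstepA : pvStepA (pvRed g) kp = (pvRed g).insert b kp.2 := by
      simp [pvStepA, ← hb, hcred]
    apply PySem.Dict.ext
    rw [hstepA, hmod, PySem.Dict.items_insert_of_not_contains _ _ hcred]
    show (pvRed g).items ++ [(b, kp.2)] = (g.insert b [kp.2]).items.map (fun q => (q.1, pyMin q.2))
    rw [PySem.Dict.items_insert_of_not_contains _ _ hc', List.map_append]
    rfl

theorem pv_inv_pres (g : PySem.Dict String (List Int)) (h : pvInv g) (kp : String × Int) :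
    pvInv (pvStepB g kp) := by
  obtain ⟨hnd, hne⟩ := h
  refine ⟨PySem.Dict.nodup_keys_insert _ _ _ hnd, ?_⟩
  intro q hq
  rcases (PySem.Dict.mem_items_insert _ _ _ _).mp hq with h | h
  · subst h; simp
  · exact hne _ h.1

theorem pv_fold_comm (l : List (String × Int)) :
    ∀ (g : PySem.Dict String (List Int)), pvInv g →
      l.foldl pvStepA (pvRed g) = pvRed (l.foldl pvStepB g) := by
  induction l with
  | nil => intro g _; rfl
  | cons kp t ih =>
    intro g hg
    simp only [List.foldl_cons]
    rw [pv_step_comm g hg kp]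
    exact ih _ (pv_inv_pres g hg kp)

-- ===== VERDICT (by name: the statement is the Claim_ definition above) =====
theorem collapse_pizza_category_to_bases_spec : Claim_equal_collapse_pizza_category_to_bases := by
  intro category items_dict _
  unfold Spec_collapse_pizza_category_to_bases
  unfold collapse_pizza_category_to_bases collapse_pizza_category_to_bases_alt
  by_cases hcat : ¬ (category = "Pizzas Tradicionales" ∨ category = "Pizzas Especiales")
  · simp [hcat]
  · simp only [hcat, if_false]
    have hempty : pvInv (PySem.Dict.empty : PySem.Dict String (List Int)) :=
      ⟨List.nodup_nil, by intro q hq; simp [PySem.Dict.empty] at hq⟩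
    have h := pv_fold_comm items_dict PySem.Dict.empty hempty
    show (items_dict.foldl pvStepA (pvRed PySem.Dict.empty)).items = _
    rw [h]
    rfl
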